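-- pv_equiv track=rewrite | github.com/luisfpatrocinio/beecrowd | bee_1253.py | deslocar_caracteres
-- ===== SOURCE A (Python) =====
-- def deslocar_caracteres(texto, deslocamento):
--     texto_deslocado = ""
--     for letra in texto:
--         codigo = ord(letra) - deslocamento
--         if (codigo < 65):                   # Se a letra for menor que 'A'
--             codigo = 91 - (65 - codigo)     # Subtrair a diferença entre 'A' e o código da letra para fazer a volta
--         letra = chr(codigo)
--         texto_deslocado += letra
--     return texto_deslocado
-- ===== SOURCE B (Python) =====
-- def deslocar_caracteres(texto, deslocamento):
--     # Divide and conquer: a one-char string is shifted directly (wrap once by +26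
--     # if the code falls below 65, same rule as 91 - (65 - codigo)); longer strings
--     # are split in half, each half shifted recursively, and the results concatenated.
--     n = len(texto)
--     if n == 0:
--         return ""
--     if n == 1:
--         codigo = ord(texto) - deslocamento
--         if codigo < 65:
--             codigo += 26
--         return chr(codigo)
--     meio = n // 2
--     return (deslocar_caracteres(texto[:meio], deslocamento)
--             + deslocar_caracteres(texto[meio:], deslocamento))
-- ===== Notes on version B (the rewrite author's own statement) =====
-- stated objective: alternative
-- what changed: Replaces A's linear accumulate-and-concatenate loop with a divide-and-conquer recursion: split the string in half, shift each half recursively (one-char base case does the wrap-once shift), concatenate the results.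
import Mathlib
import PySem

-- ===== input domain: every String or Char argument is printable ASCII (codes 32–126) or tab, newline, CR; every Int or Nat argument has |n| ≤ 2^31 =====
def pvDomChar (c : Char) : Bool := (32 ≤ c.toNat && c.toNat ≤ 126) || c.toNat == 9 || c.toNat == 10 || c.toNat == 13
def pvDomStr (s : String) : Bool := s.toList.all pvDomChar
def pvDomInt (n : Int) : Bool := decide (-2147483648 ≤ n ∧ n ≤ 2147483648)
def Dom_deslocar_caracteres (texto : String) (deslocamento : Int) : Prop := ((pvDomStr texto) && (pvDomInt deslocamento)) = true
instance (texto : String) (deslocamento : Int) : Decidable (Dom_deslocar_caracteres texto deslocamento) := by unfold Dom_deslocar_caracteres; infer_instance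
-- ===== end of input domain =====

-- B shifts by divide-and-conquer (halve, recurse, concatenate) instead of A's linear
-- accumulate loop; equivalence is on the return value (no argument is mutated).

-- ===== PORT A =====
-- A's per-character body: codigo = ord(letra) - deslocamento; wrap once if < 65; chr(codigo)
def pvShiftA (deslocamento : Int) (letra : Char) : Char :=
  let codigo : Int := (letra.toNat : Int) - deslocamento
  let codigo : Int := if codigo < 65 then 91 - (65 - codigo) else codigo
  Char.ofNat codigo.toNat

def deslocar_caracteres (texto : String) (deslocamento : Int) : String :=
  String.ofList (texto.toList.foldl (fun acc letra => acc ++ [pvShiftA deslocamento letra]) [])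

-- ===== PORT B =====
-- B's one-char base case: codigo = ord(texto) - deslocamento; if < 65, codigo += 26; chr(codigo)
def pvShiftB (deslocamento : Int) (c : Char) : Char :=
  let codigo : Int := (c.toNat : Int) - deslocamento
  let codigo : Int := if codigo < 65 then codigo + 26 else codigo
  Char.ofNat codigo.toNat

-- B's recursion on the character list: empty / single / split at len // 2 and concatenate
def pvBRec (deslocamento : Int) (xs : List Char) : List Char :=
  match xs with
  | [] => []
  | [c] => [pvShiftB deslocamento c]
  | x :: y :: rest =>
      let xs' := x :: y :: rest
      let meio := xs'.length / 2
      pvBRec deslocamento (xs'.take meio) ++ pvBRec deslocamento (xs'.drop meio)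
termination_by xs.length
decreasing_by
  all_goals simp [List.length_take, List.length_drop]; omega

def deslocar_caracteres_alt (texto : String) (deslocamento : Int) : String :=
  String.ofList (pvBRec deslocamento texto.toList)

-- ===== PRECONDITION & SPEC =====
-- Shifted code of a character (closed form, used only by Pre_).
def pvPreCode (deslocamento : Int) (c : Char) : Int :=
  if (c.toNat : Int) - deslocamento < 65 then (c.toNat : Int) - deslocamento + 26
  else (c.toNat : Int) - deslocamento

-- Pre_ excludes exactly the inputs where chr raises ValueError (shifted code < 0 or ≥ 0x110000)
-- and those whose output character is a surrogate codepoint (0xD800–0xDFFF), which Python returns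
-- but Lean's Char cannot represent.
def pvPreOk (deslocamento : Int) (c : Char) : Bool :=
  (0 ≤ pvPreCode deslocamento c && pvPreCode deslocamento c < 55296) ||
  (57344 ≤ pvPreCode deslocamento c && pvPreCode deslocamento c < 1114112)

def Pre_deslocar_caracteres (texto : String) (deslocamento : Int) : Prop :=
  texto.toList.all (pvPreOk deslocamento) = true
instance (texto : String) (deslocamento : Int) : Decidable (Pre_deslocar_caracteres texto deslocamento) := by unfold Pre_deslocar_caracteres; infer_instance

def pvWitness_deslocar_caracteres : String × Int := ("Hello", 3)

def Spec_deslocar_caracteres (texto : String) (deslocamento : Int) (out : String) : Prop := out = deslocar_caracteres_alt texto deslocamento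
instance (texto : String) (deslocamento : Int) (out : String) : Decidable (Spec_deslocar_caracteres texto deslocamento out) := by unfold Spec_deslocar_caracteres; infer_instance

-- ===== CLAIM (what is proved, stated in full; the proofs are below) =====
def Claim_equal_deslocar_caracteres : Prop := ∀ (texto : String) (deslocamento : Int), Dom_deslocar_caracteres texto deslocamento → Pre_deslocar_caracteres texto deslocamento → Spec_deslocar_caracteres texto deslocamento (deslocar_caracteres texto deslocamento)

-- ===== LEMMAS AND PROOFS =====

-- the two per-character shifts compute the same character (91 - (65 - k) = k + 26)
lemma pvShift_eq (d : Int) (c : Char) : pvShiftA d c = pvShiftB d c := by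
  show (let codigo : Int := (c.toNat : Int) - d;
        let codigo : Int := if codigo < 65 then 91 - (65 - codigo) else codigo;
        Char.ofNat codigo.toNat)
      = (let codigo : Int := (c.toNat : Int) - d;
        let codigo : Int := if codigo < 65 then codigo + 26 else codigo;
        Char.ofNat codigo.toNat)
  simp only []
  split_ifs with h
  · congr 1; omega
  · rfl

-- B's divide-and-conquer recursion computes the per-character map
lemma pvBRec_eq_map (d : Int) (xs : List Char) : pvBRec d xs = xs.map (pvShiftB d) := by
  induction xs using pvBRec.induct with
  | case1 => simp [pvBRec]
  | case2 c => simp [pvBRec]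
  | case3 x y rest _xs' _meio ih1 ih2 =>
      rw [pvBRec]
      simp only [] at ih1 ih2 ⊢
      rw [ih1, ih2, ← List.map_append, List.take_append_drop]

-- ===== VERDICT (by name: the statement is the Claim_ definition above) =====
theorem deslocar_caracteres_spec : Claim_equal_deslocar_caracteres := by
  intro texto deslocamento _ _
  show deslocar_caracteres texto deslocamento = deslocar_caracteres_alt texto deslocamento
  unfold deslocar_caracteres deslocar_caracteres_alt
  rw [PySem.List.foldl_append_singleton_eq_map, pvBRec_eq_map]
  rw [show pvShiftA deslocamento = pvShiftB deslocamento from funext (pvShift_eq deslocamento)]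
  simp
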